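-- pv_equiv track=rewrite | github.com/mabegon/advent-of-code-2020 | python/Day7.py | who_can_hold_by_rules
-- ===== SOURCE A (Python) =====
-- def who_can_hold_by_rule(container_bag, content_bags):
--     # {'light red': { 'bright white': '1', 'muted yellow': '2'}}
--     result = {}
--     #container_bag = [element for element in rule.keys() if rule[element] == 'container'][0]
--     #content_bags = [element for element in rule.keys() if rule[element] != 'container']
--     for bag in content_bags:
--         result[bag] = container_bag
--     return result
--
-- def who_can_hold_by_rules(rules):
--     who_dict_consolidated = {}
--     for rule_key in rules.keys():
--
--         who_by_rule = who_can_hold_by_rule(rule_key, rules[rule_key])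
--         for bag in who_by_rule.keys():
--             if bag not in who_dict_consolidated.keys():
--                 who_dict_consolidated[bag] = [who_by_rule[bag]]
--             else:
--                 who_dict_consolidated[bag].append(who_by_rule[bag])
--     return who_dict_consolidated
-- ===== SOURCE B (Python) =====
-- def who_can_hold_by_rules(rules):
--     # ordered first-appearance list of all content bags, then one scan of the
--     # rules per bag collecting its containers in rules order
--     order = dict.fromkeys(bag for contents in rules.values() for bag in contents)
--     return {bag: [container for container in rules if bag in rules[container]]
--             for bag in order}
-- ===== Notes on version B (the rewrite author's own statement) =====
-- stated objective: idiomatic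
-- what changed: Replaces A's single forward pass that accumulates a growing dict of lists (insert-or-append per bag) by first collecting the ordered unique content bags with dict.fromkeys and then a dict comprehension that re-scans the rules once per bag to list its containers.
import Mathlib
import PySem

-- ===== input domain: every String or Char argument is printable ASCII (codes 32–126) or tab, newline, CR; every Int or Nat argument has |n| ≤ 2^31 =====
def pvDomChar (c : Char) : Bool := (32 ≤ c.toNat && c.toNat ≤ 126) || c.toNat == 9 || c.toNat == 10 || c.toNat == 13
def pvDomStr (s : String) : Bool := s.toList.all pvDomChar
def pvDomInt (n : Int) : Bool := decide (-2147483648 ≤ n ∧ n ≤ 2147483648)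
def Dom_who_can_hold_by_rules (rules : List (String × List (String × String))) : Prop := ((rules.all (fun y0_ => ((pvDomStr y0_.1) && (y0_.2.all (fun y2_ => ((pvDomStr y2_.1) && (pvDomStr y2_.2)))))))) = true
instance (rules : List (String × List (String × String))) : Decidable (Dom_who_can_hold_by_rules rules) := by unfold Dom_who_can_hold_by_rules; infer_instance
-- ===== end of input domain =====

-- B replaces A's single forward accumulation into a dict of lists by "collect the ordered
-- unique content bags, then one rules-scan per bag" (idiomatic dict.fromkeys + comprehension).
-- The Python arguments are dicts; both ports marshal the association list through
-- PySem.Dict.ofList (dict(pairs): last value wins, first position kept), exactly as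
-- Python builds the dict the functions receive.

-- ===== PORT A =====
def who_can_hold_by_rule (container_bag : String) (content_bags : List (String × String)) : PySem.Dict String String :=
  -- 'for bag in content_bags: result[bag] = container_bag'; iterating the inner dict's keys
  -- and inserting each is the same dict as inserting every listed key in order
  content_bags.foldl (fun result p => result.insert p.1 container_bag) PySem.Dict.empty

def pvConsolidateRule (acc : PySem.Dict String (List String)) (r : String × List (String × String)) : PySem.Dict String (List String) :=
  let who_by_rule := who_can_hold_by_rule r.1 r.2
  who_by_rule.keys.foldl (fun acc bag =>
    if acc.contains bag = false then acc.insert bag [who_by_rule.getD bag ""]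
    else acc.modify bag [] (fun l => l ++ [who_by_rule.getD bag ""])) acc

def who_can_hold_by_rules (rules : List (String × List (String × String))) : List (String × List String) :=
  ((PySem.Dict.ofList rules).items.foldl pvConsolidateRule PySem.Dict.empty).items

-- ===== PORT B =====
def who_can_hold_by_rules_alt (rules : List (String × List (String × String))) : List (String × List String) :=
  let items := (PySem.Dict.ofList rules).items
  let order := PySem.List.dedup (items.flatMap (fun r => r.2.map Prod.fst))
  order.map (fun bag =>
    (bag, (items.filter (fun r => (r.2.map Prod.fst).contains bag)).map Prod.fst))

-- ===== PRECONDITION & SPEC =====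
def Spec_who_can_hold_by_rules (rules : List (String × List (String × String))) (out : List (String × List String)) : Prop := out = who_can_hold_by_rules_alt rules
instance (rules : List (String × List (String × String))) (out : List (String × List String)) : Decidable (Spec_who_can_hold_by_rules rules out) := by unfold Spec_who_can_hold_by_rules; infer_instance

-- ===== CLAIM (what is proved, stated in full; the proofs are below) =====
def Claim_equal_who_can_hold_by_rules : Prop := ∀ (rules : List (String × List (String × String))), Dom_who_can_hold_by_rules rules → Spec_who_can_hold_by_rules rules (who_can_hold_by_rules rules)

-- ===== LEMMAS AND PROOFS =====

-- who_by_rule maps every content key to the container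
theorem pv_who_getD (c : String) (contents : List (String × String)) (d : PySem.Dict String String) (bag : String) :
    (contents.foldl (fun r p => r.insert p.1 c) d).getD bag ""
      = if bag ∈ contents.map Prod.fst then c else d.getD bag "" := by
  induction contents generalizing d with
  | nil => simp
  | cons p rest ih =>
    simp only [List.foldl_cons, ih, List.map_cons, List.mem_cons, PySem.Dict.getD_insert]
    by_cases h1 : bag ∈ rest.map Prod.fst <;> by_cases h2 : bag = p.1 <;> simp [h1, h2]

theorem pv_who_keys (c : String) (contents : List (String × String)) :
    (who_can_hold_by_rule c contents).keys = PySem.Set.ofList (contents.map Prod.fst) := by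
  simp [who_can_hold_by_rule, PySem.Dict.keys_foldl_insert_key, PySem.Set.update_nil_left]

-- inner loop over a duplicate-free key list: effect on one lookup
theorem pv_inner_getD (v : String → String) (ks : List String) (hk : ks.Nodup)
    (acc : PySem.Dict String (List String)) (bag : String) :
    (ks.foldl (fun acc b =>
        if acc.contains b = false then acc.insert b [v b]
        else acc.modify b [] (fun l => l ++ [v b])) acc).getD bag []
      = acc.getD bag [] ++ (if bag ∈ ks then [v bag] else []) := by
  induction ks generalizing acc with
  | nil => simp
  | cons b rest ih =>
    obtain ⟨hb, hrest⟩ := List.nodup_cons.mp hk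
    simp only [List.foldl_cons, ih hrest]
    by_cases heq : bag = b
    · subst heq
      have hmem : bag ∉ rest := hb
      by_cases hc : acc.contains bag = false
      · simp [hc, hmem, PySem.Dict.getD_insert_self,
              PySem.Dict.getD_of_not_contains acc [] hc]
      · simp [hc, hmem, PySem.Dict.getD_modify_self]
    · by_cases hc : acc.contains b = false <;>
        simp [hc, heq, PySem.Dict.getD_insert_of_ne _ _ _ heq,
              PySem.Dict.getD_modify_of_ne _ _ _ heq]

-- inner loop: effect on the key list
theorem pv_inner_keys (v : String → String) (ks : List String)
    (acc : PySem.Dict String (List String)) :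
    (ks.foldl (fun acc b =>
        if acc.contains b = false then acc.insert b [v b]
        else acc.modify b [] (fun l => l ++ [v b])) acc).keys
      = PySem.Set.update acc.keys ks := by
  induction ks generalizing acc with
  | nil => simp [PySem.Set.update_nil]
  | cons b rest ih =>
    simp only [List.foldl_cons, ih, PySem.Set.update_cons]
    congr 1
    by_cases hc : acc.contains b = false
    · have hm : b ∉ acc.keys := fun h => by
        simp [(PySem.Dict.contains_iff_mem_keys acc b).mpr h] at hc
      simp [hc, PySem.Dict.keys_insert_of_not_contains _ _ hc, PySem.Set.add_of_not_mem hm]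
    · have hb : acc.contains b = true := by revert hc; cases acc.contains b <;> simp
      have hm : b ∈ acc.keys := (PySem.Dict.contains_iff_mem_keys acc b).mp hb
      simp [hb, PySem.Dict.keys_modify, PySem.Dict.keys_insert_of_contains _ _ hb,
            PySem.Set.add_of_mem hm]

theorem pv_step_getD (acc : PySem.Dict String (List String)) (r : String × List (String × String)) (bag : String) :
    (pvConsolidateRule acc r).getD bag []
      = acc.getD bag [] ++ (if (r.2.map Prod.fst).contains bag then [r.1] else []) := by
  unfold pvConsolidateRule
  rw [pv_inner_getD _ _ (by rw [pv_who_keys]; exact PySem.Set.nodup_ofList _)]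
  rw [pv_who_keys]
  by_cases h : bag ∈ r.2.map Prod.fst
  · simp [PySem.Set.mem_ofList, h, List.contains_eq_mem,
          who_can_hold_by_rule, pv_who_getD]
  · simp [PySem.Set.mem_ofList, h, List.contains_eq_mem]

theorem pv_step_keys (acc : PySem.Dict String (List String)) (r : String × List (String × String)) :
    (pvConsolidateRule acc r).keys = PySem.Set.update acc.keys (r.2.map Prod.fst) := by
  unfold pvConsolidateRule
  rw [pv_inner_keys, pv_who_keys]
  rw [PySem.Set.update_eq_append_filter, PySem.Set.update_eq_append_filter, PySem.Set.ofList_ofList]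

theorem pv_core_getD (l : List (String × List (String × String)))
    (acc : PySem.Dict String (List String)) (bag : String) :
    (l.foldl pvConsolidateRule acc).getD bag []
      = acc.getD bag [] ++ (l.filter (fun r => (r.2.map Prod.fst).contains bag)).map Prod.fst := by
  induction l generalizing acc with
  | nil => simp
  | cons r rest ih =>
    simp only [List.foldl_cons, ih, pv_step_getD]
    by_cases h : bag ∈ r.2.map Prod.fst <;>
      simp [h, List.contains_eq_mem]
  
theorem pv_core_keys (l : List (String × List (String × String)))
    (acc : PySem.Dict String (List String)) :
    (l.foldl pvConsolidateRule acc).keys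
      = PySem.Set.update acc.keys (l.flatMap (fun r => r.2.map Prod.fst)) := by
  induction l generalizing acc with
  | nil => simp [PySem.Set.update_nil]
  | cons r rest ih =>
    simp only [List.foldl_cons, ih, pv_step_keys, List.flatMap_cons, PySem.Set.update_append]

-- ===== VERDICT (by name: the statement is the Claim_ definition above) =====
theorem who_can_hold_by_rules_spec : Claim_equal_who_can_hold_by_rules := by
  intro rules _
  unfold Spec_who_can_hold_by_rules who_can_hold_by_rules who_can_hold_by_rules_alt
  set l := (PySem.Dict.ofList rules).items with hl
  have hkeys : (l.foldl pvConsolidateRule PySem.Dict.empty).keys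
      = PySem.List.dedup (l.flatMap (fun r => r.2.map Prod.fst)) := by
    rw [pv_core_keys, PySem.Dict.keys_empty, PySem.Set.update_nil_left, PySem.List.dedup_eq_ofList]
  have hnd : (l.foldl pvConsolidateRule PySem.Dict.empty).keys.Nodup := by
    rw [hkeys, PySem.List.dedup_eq_ofList]; exact PySem.Set.nodup_ofList _
  rw [PySem.Dict.items_eq_map_keys _ hnd [], hkeys]
  refine List.map_congr_left (fun bag _ => ?_)
  rw [pv_core_getD, PySem.Dict.getD_empty]
  simp
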